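-- pv_equiv track=rewrite | github.com/jeffr058/ls_py110 | lesson_01/assignment_12/sort_by_most_adjacent_consonants.py | sort_by_consonant_count
-- ===== SOURCE A (Python) =====
-- def count_max_adjacent_consonants(input_string):
--     temp_string = ''
--     max_count = 0
--     last_index = len(input_string) - 1
--     VOWELS = ('a', 'e', 'i', 'o', 'u')
--
--     for idx, char in enumerate(input_string):
--         if char.isspace() or (idx == 0 and char in VOWELS):
--             continue
--         elif idx == last_index and char not in VOWELS:
--             temp_string += char
--             if 1 < len(temp_string) > max_count:
--                 max_count = len(temp_string)
--             temp_string = ''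
--         elif char in VOWELS:
--             if 1 < len(temp_string) > max_count:
--                 max_count = len(temp_string)
--             temp_string = ''
--         else:
--             temp_string += char
--
--     return max_count
--
-- def sort_by_consonant_count(input_list):
--     max_count_dictionary = {}
--
--     for string in input_list:
--         max_count_dictionary[string] = count_max_adjacent_consonants(string)
--
--     max_num = max(max_count_dictionary.values())
--     ordered_strings_list = []
--
--     while max_num >= 0:
--         for string in max_count_dictionary:
--             if max_count_dictionary[string] == max_num:
--                 ordered_strings_list.append(string)
--         max_num -= 1
--
--     return ordered_strings_list
-- ===== SOURCE B (Python) =====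
-- def count_max_adjacent_consonants(input_string):
--     temp_string = ''
--     max_count = 0
--     last_index = len(input_string) - 1
--     VOWELS = ('a', 'e', 'i', 'o', 'u')
--
--     for idx, char in enumerate(input_string):
--         if char.isspace() or (idx == 0 and char in VOWELS):
--             continue
--         elif idx == last_index and char not in VOWELS:
--             temp_string += char
--             if 1 < len(temp_string) > max_count:
--                 max_count = len(temp_string)
--             temp_string = ''
--         elif char in VOWELS:
--             if 1 < len(temp_string) > max_count:
--                 max_count = len(temp_string)
--             temp_string = ''
--         else:
--             temp_string += char
--
--     return max_count
--
-- def sort_by_consonant_count(input_list):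
--     counts = {s: count_max_adjacent_consonants(s) for s in input_list}
--     buckets = {}
--     for s, c in counts.items():
--         buckets.setdefault(c, []).append(s)
--     result = []
--     for c in range(max(counts.values()), -1, -1):
--         result.extend(buckets.get(c, []))
--     return result
-- ===== Notes on version B (the rewrite author's own statement) =====
-- stated objective: alternative
-- what changed: Instead of rescanning the whole dict once per count level (while max_num >= 0: scan all keys), B groups the strings into count-indexed buckets in one pass and then emits each bucket once in a single descending sweep; same measured cost since the helper dominates.
import Mathlib
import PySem

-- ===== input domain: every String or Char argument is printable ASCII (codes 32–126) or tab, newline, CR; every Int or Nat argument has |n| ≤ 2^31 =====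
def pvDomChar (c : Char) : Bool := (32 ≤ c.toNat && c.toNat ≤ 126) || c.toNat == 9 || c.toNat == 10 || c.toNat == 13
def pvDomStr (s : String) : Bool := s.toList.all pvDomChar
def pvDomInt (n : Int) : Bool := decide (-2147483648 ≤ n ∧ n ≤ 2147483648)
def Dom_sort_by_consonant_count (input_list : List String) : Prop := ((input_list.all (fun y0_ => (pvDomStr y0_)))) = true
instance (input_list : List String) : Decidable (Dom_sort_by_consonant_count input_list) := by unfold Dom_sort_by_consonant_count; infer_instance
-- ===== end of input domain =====

-- B builds count-indexed buckets in one pass and emits them in a single descending sweep,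
-- replacing A's full-dict rescan at every count level (return value only; no mutation involved).


-- ===== PORT A =====
-- helper shared verbatim by A and B (the Python helper is identical in Source A and Source B)
def count_max_adjacent_consonants (input_string : String) : Int :=
  let vowels : List Char := ['a', 'e', 'i', 'o', 'u']
  let lastIndex : Int := (PySem.Str.len input_string) - 1
  let st := (PySem.List.enumerate input_string.toList).foldl
    (fun (acc : List Char × Int) (p : Int × Char) =>
      let temp := acc.1
      let mx := acc.2
      if PySem.Chars.isspace p.2 || (p.1 == 0 && vowels.contains p.2) then acc
      else if p.1 == lastIndex && !vowels.contains p.2 then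
        let temp := temp ++ [p.2]
        (([] : List Char), if 1 < temp.length && (temp.length : Int) > mx then (temp.length : Int) else mx)
      else if vowels.contains p.2 then
        (([] : List Char), if 1 < temp.length && (temp.length : Int) > mx then (temp.length : Int) else mx)
      else (temp ++ [p.2], mx)) ([], 0)
  st.2

-- A's while-loop: for each level max_num, a full pass over the dict's keys (d[string] is total here:
-- every key of the dict is looked up in the same dict, so getD matches Python's d[string])
def sbccALoop (d : PySem.Dict String Int) (maxNum : Int) (acc : List String) : List String :=
  if _h : maxNum ≥ 0 then
    sbccALoop d (maxNum - 1)
      (d.keys.foldl (fun acc s => if d.getD s 0 == maxNum then acc ++ [s] else acc) acc)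
  else acc
termination_by (maxNum + 1).toNat
decreasing_by omega

def sort_by_consonant_count (input_list : List String) : List String :=
  let d := input_list.foldl (fun d s => d.insert s (count_max_adjacent_consonants s)) PySem.Dict.empty
  match PySem.List.max? d.values (fun x => x) with
  | none => []   -- Python raises ValueError here (max of empty); excluded by Pre_
  | some maxNum => sbccALoop d maxNum []

-- ===== PORT B =====
def sort_by_consonant_count_alt (input_list : List String) : List String :=
  let counts := input_list.foldl (fun d s => d.insert s (count_max_adjacent_consonants s)) PySem.Dict.empty
  let buckets := counts.items.foldl
    (fun (b : PySem.Dict Int (List String)) p => b.modify p.2 [] (· ++ [p.1])) PySem.Dict.empty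
  match PySem.List.max? counts.values (fun x => x) with
  | none => []   -- Python raises ValueError here (max of empty); excluded by Pre_
  | some m => (PySem.List.pyRange m (-1) (-1)).foldl (fun r c => r ++ buckets.getD c []) []

-- ===== PRECONDITION & SPEC =====
-- A raises ValueError (max() of an empty sequence) on the empty list, and so does B; nothing else raises.
def Pre_sort_by_consonant_count (input_list : List String) : Prop := input_list ≠ []
instance (input_list : List String) : Decidable (Pre_sort_by_consonant_count input_list) := by unfold Pre_sort_by_consonant_count; infer_instance
def pvWitness_sort_by_consonant_count : List String := ["strength", "aeiou", "bcd"]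

def Spec_sort_by_consonant_count (input_list : List String) (out : List String) : Prop := out = sort_by_consonant_count_alt input_list
instance (input_list : List String) (out : List String) : Decidable (Spec_sort_by_consonant_count input_list out) := by unfold Spec_sort_by_consonant_count; infer_instance

-- ===== CLAIM (what is proved, stated in full; the proofs are below) =====
def Claim_equal_sort_by_consonant_count : Prop := ∀ (input_list : List String), Dom_sort_by_consonant_count input_list → Pre_sort_by_consonant_count input_list → Spec_sort_by_consonant_count input_list (sort_by_consonant_count input_list)

-- ===== LEMMAS AND PROOFS =====

theorem sbcc_nodup_keys (input_list : List String) :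
    (input_list.foldl (fun d s => d.insert s (count_max_adjacent_consonants s)) PySem.Dict.empty).keys.Nodup := by
  exact PySem.Dict.nodup_keys_foldl_insert input_list _ PySem.Dict.empty (by simp)

-- one level of A's scan = the keys whose stored count is maxNum, in dict order
theorem sbcc_level (d : PySem.Dict String Int) (hnd : d.keys.Nodup) (m : Int) (acc : List String) :
    d.keys.foldl (fun acc s => if d.getD s 0 == m then acc ++ [s] else acc) acc
      = acc ++ (d.items.filter (fun p => p.2 == m)).map (·.1) := by
  rw [PySem.List.foldl_append_if_eq_filter]
  congr 1
  rw [PySem.Dict.items_eq_map_keys d hnd 0, List.filter_map, List.map_map]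
  simp [Function.comp_def]

-- A's whole loop, as a flatMap over the countdown range
theorem sbcc_aloop (d : PySem.Dict String Int) (hnd : d.keys.Nodup) (m : Int) (acc : List String) :
    sbccALoop d m acc
      = acc ++ (PySem.List.pyRange m (-1) (-1)).flatMap
          (fun c => (d.items.filter (fun p => p.2 == c)).map (·.1)) := by
  by_cases h : m ≥ 0
  · rw [sbccALoop, dif_pos h, sbcc_aloop d hnd (m - 1), sbcc_level d hnd m acc,
      PySem.List.pyRange_neg_one_cons (by omega : (-1 : Int) < m)]
    simp
  · rw [sbccALoop, dif_neg h, PySem.List.pyRange_neg_one_eq_nil (by omega : m ≤ -1)]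
    simp
termination_by (m + 1).toNat
decreasing_by omega

-- B's bucket lookup = the strings whose count is c, in dict order
theorem sbcc_bucket (items : List (String × Int)) (c : Int) :
    (items.foldl (fun (b : PySem.Dict Int (List String)) p => b.modify p.2 [] (· ++ [p.1]))
        PySem.Dict.empty).getD c []
      = (items.filter (fun p => p.2 == c)).map (·.1) := by
  have h : items.foldl (fun (b : PySem.Dict Int (List String)) p => b.modify p.2 [] (· ++ [p.1]))
        PySem.Dict.empty
      = (items.map Prod.swap).foldl (fun (b : PySem.Dict Int (List String)) p => b.modify p.1 [] (· ++ [p.2]))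
        PySem.Dict.empty := by
    rw [List.foldl_map]; rfl
  rw [h, PySem.Dict.getD_foldl_modify_append, PySem.Dict.getD_empty, List.filter_map, List.map_map]
  simp [Function.comp_def, Prod.swap]

-- ===== VERDICT (by name: the statement is the Claim_ definition above) =====
theorem sort_by_consonant_count_spec : Claim_equal_sort_by_consonant_count := by
  intro input_list _ _
  unfold Spec_sort_by_consonant_count sort_by_consonant_count sort_by_consonant_count_alt
  cases hm : PySem.List.max?
      (input_list.foldl (fun d s => d.insert s (count_max_adjacent_consonants s)) PySem.Dict.empty).values
      (fun x => x) with
  | none => simp [hm]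
  | some m =>
    simp only [hm]
    rw [sbcc_aloop _ (sbcc_nodup_keys input_list) m [],
      PySem.List.foldl_append_eq_flatMap]
    simp only [List.nil_append]
    congr 1
    funext c
    rw [sbcc_bucket]
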